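-- pv_equiv track=rewrite | github.com/Rediet8abere/leetcode | mock.py | freqWord
-- ===== SOURCE A (Python) =====
-- def freqWord(text):
--     text_list = text.split()
--     word_count = {}
--     count = 1
--     for i in range(len(text_list)):
--         if text_list[i] not in word_count:
--             word_count[text_list[i]] = count
--         else:
--             word_count[text_list[i]]+= 1
--     get_value = list(word_count.values())
--     return sorted(get_value)[len(get_value)-1]
-- ===== SOURCE B (Python) =====
-- def freqWord(text):
--     words = text.split()
--     return max(words.count(w) for w in words)
-- ===== Notes on version B (the rewrite author's own statement) =====
-- stated objective: simpler
-- what changed: Replaces the hand-built frequency dict plus sort-and-index-last with a direct maximum of words.count(w) taken over the words.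
import Mathlib
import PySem

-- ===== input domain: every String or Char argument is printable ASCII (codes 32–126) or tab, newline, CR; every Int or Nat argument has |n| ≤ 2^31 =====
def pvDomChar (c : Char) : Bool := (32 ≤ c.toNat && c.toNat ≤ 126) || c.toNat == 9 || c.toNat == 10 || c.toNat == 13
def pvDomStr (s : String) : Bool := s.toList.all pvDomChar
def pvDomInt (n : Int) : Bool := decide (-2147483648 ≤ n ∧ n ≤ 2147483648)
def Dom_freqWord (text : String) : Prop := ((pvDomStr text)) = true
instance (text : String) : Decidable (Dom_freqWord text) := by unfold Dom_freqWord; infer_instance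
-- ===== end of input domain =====

-- B replaces A's frequency dict plus sort-and-index-last by a direct maximum of words.count(w)
-- over the words (objective: simpler; not faster). Both raise on word-less input (excluded by Pre_).

-- ===== PORT A =====
def freqWord (text : String) : Int :=
  let textList := PySem.Str.split₀ text
  let count : Int := 1
  let wordCount :=
    (PySem.List.pyRange 0 (textList.length : Int) 1).foldl
      (fun d i =>
        let w := PySem.List.pyGetD textList i ""
        if d.contains w = false then d.insert w count
        else d.modify w 0 (fun v => v + 1))
      (PySem.Dict.empty : PySem.Dict String Int)
  let getValue := wordCount.values
  (PySem.List.pyGet? (PySem.List.sorted getValue (fun x => x) false)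
      ((getValue.length : Int) - 1)).getD 0

-- ===== PORT B =====
def freqWord_alt (text : String) : Int :=
  let words := PySem.Str.split₀ text
  (PySem.List.max? (words.map (fun w => (PySem.List.count words w : Int))) (fun x => x)).getD 0

-- ===== PRECONDITION & SPEC =====
-- Pre_ excludes exactly the inputs with no words (empty or whitespace-only text), on which A raises IndexError.
def Pre_freqWord (text : String) : Prop := PySem.Str.split₀ text ≠ []
instance (text : String) : Decidable (Pre_freqWord text) := by unfold Pre_freqWord; infer_instance
def pvWitness_freqWord : String := "a b a"

def Spec_freqWord (text : String) (out : Int) : Prop := out = freqWord_alt text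
instance (text : String) (out : Int) : Decidable (Spec_freqWord text out) := by unfold Spec_freqWord; infer_instance

-- ===== CLAIM (what is proved, stated in full; the proofs are below) =====
def Claim_equal_freqWord : Prop := ∀ (text : String), Dom_freqWord text → Pre_freqWord text → Spec_freqWord text (freqWord text)

-- ===== LEMMAS AND PROOFS =====

-- in a (· ≤ ·)-pairwise list every element is bounded by the last one
theorem pv_le_getLast : ∀ {l : List Int}, l.Pairwise (· ≤ ·) →
    ∀ {x g : Int}, x ∈ l → l.getLast? = some g → x ≤ g := by
  intro l
  induction l with
  | nil => intro _ x g hx; simp at hx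
  | cons a t ih =>
    intro hp x g hx hg
    cases t with
    | nil =>
      simp at hx hg; omega
    | cons b t' =>
      rw [List.getLast?_cons_cons] at hg
      rcases List.mem_cons.mp hx with rfl | hxt
      · exact le_trans (List.rel_of_pairwise_cons hp (List.mem_of_getLast? hg)) le_rfl
      · exact ih hp.of_cons hxt hg

-- A's dict-building loop body is exactly the Counter step
theorem pv_body_eq :
    (fun (d : PySem.Dict String Int) (w : String) =>
        if d.contains w = false then d.insert w 1 else d.modify w 0 (fun v => v + 1)) =
    (fun d w => d.modify w 0 (fun v => v + 1)) := by
  funext d w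
  by_cases h : d.contains w = false
  · have hg : d.getD w 0 = 0 := by
      unfold PySem.Dict.getD
      rw [(PySem.Dict.get?_eq_none_iff_contains d w).mpr h]
      rfl
    simp [h, PySem.Dict.modify, hg]
  · simp [h]

-- ===== VERDICT (by name: the statement is the Claim_ definition above) =====
theorem freqWord_spec : Claim_equal_freqWord := by
  intro text _ hpre
  unfold Pre_freqWord at hpre
  unfold Spec_freqWord freqWord freqWord_alt
  simp only []
  set ws := PySem.Str.split₀ text with hws
  -- A's index loop over range(len) is a fold over the word list
  rw [PySem.List.foldl_pyRange_pyGetD' ws "" (fun (d : PySem.Dict String Int) (w : String) => if d.contains w = false then d.insert w 1 else d.modify w 0 (fun v => v + 1)) PySem.Dict.empty (le_refl 0)]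
  simp only [Int.toNat_zero, List.drop_zero]
  rw [pv_body_eq, ← PySem.Dict.counter_eq_foldl]
  -- the dict's values are the counts of the distinct words
  have hc : ∀ w : String, (PySem.List.count ws w : Int) = ((List.count w ws : Nat) : Int) := by
    intro w; rw [PySem.List.count_eq]
  simp only [PySem.Dict.values, PySem.Dict.items_counter, List.map_map, Function.comp_def]
  set c : String → Int := fun k => ((List.count k ws : Nat) : Int) with hcdef
  set vals : List Int := (PySem.Set.ofList ws).map c with hvals
  set l : List Int := PySem.List.sorted vals (fun x => x) false with hl
  -- both lists are nonempty
  have hwne : ws ≠ [] := hpre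
  have hvne : vals ≠ [] := by
    cases hws' : ws with
    | nil => exact absurd hws' hwne
    | cons a t =>
      have : a ∈ PySem.Set.ofList ws := (PySem.Set.mem_ofList ws a).mpr (by rw [hws']; exact List.mem_cons_self)
      intro h0
      rw [hvals] at h0
      rcases List.map_eq_nil_iff.mp h0 with h1
      rw [h1] at this; simp at this
  have hlne : l ≠ [] := by
    rw [hl]; intro h; exact hvne ((PySem.List.sorted_eq_nil_iff vals _ false).mp h)
  have hlen : l.length = vals.length := PySem.List.length_sorted vals _ false
  have hvpos : 0 < vals.length := List.length_pos_iff.mpr hvne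
  -- A's result: the last element of the sorted value list
  obtain ⟨g, hg⟩ : ∃ g, l.getLast? = some g := by
    cases h : l.getLast? with
    | none => exact absurd (List.getLast?_eq_none_iff.mp h) hlne
    | some g => exact ⟨g, rfl⟩
  have hidx : PySem.List.pyGet? l ((vals.length : Int) - 1) = some g := by
    rw [PySem.List.pyGet?_of_nonneg l (by omega)]
    have ht : ((vals.length : Int) - 1).toNat = l.length - 1 := by omega
    rw [ht, ← List.getLast?_eq_getElem?, hg]
  -- B's result: the maximum of the count list
  obtain ⟨m, hm⟩ : ∃ m, PySem.List.max? (ws.map c) (fun x => x) = some m := by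
    cases h : PySem.List.max? (ws.map c) (fun x => x) with
    | none =>
      have := (PySem.List.max?_eq_none_iff (ws.map c) (fun x => x)).mp h
      exact absurd (List.map_eq_nil_iff.mp this) hwne
    | some m => exact ⟨m, rfl⟩
  -- the two agree
  have hmem_l : ∀ x, x ∈ l ↔ x ∈ vals := fun x => (PySem.List.sorted_perm vals _ false).mem_iff
  have hgm : g = m := by
    have hgv : g ∈ vals := (hmem_l g).mp (List.mem_of_getLast? hg)
    have hgmap : g ∈ ws.map c := by
      rcases List.mem_map.mp hgv with ⟨w, hw, rfl⟩
      exact List.mem_map.mpr ⟨w, (PySem.Set.mem_ofList ws w).mp hw, rfl⟩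
    have h1 : g ≤ m := PySem.List.max?_isMax hm g hgmap
    have hmv : m ∈ vals := by
      rcases List.mem_map.mp (PySem.List.max?_mem hm) with ⟨w, hw, rfl⟩
      exact List.mem_map.mpr ⟨w, (PySem.Set.mem_ofList ws w).mpr hw, rfl⟩
    have h2 : m ≤ g := by
      have hpw : l.Pairwise (· ≤ ·) := by
        have := PySem.List.sorted_pairwise vals (fun x : Int => x)
        simpa [hl] using this
      exact pv_le_getLast hpw ((hmem_l m).mpr hmv) hg
    omega
  simp only [hc]
  rw [hidx, hm, hgm]
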